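-- pv_equiv track=rewrite | github.com/mintford/lab4 | lab_4/8 ферзей с помощью Генетического алгоритма.py | Fitnes
-- ===== SOURCE A (Python) =====
-- def Max_Fitnes(bord_size):
--     max_fitnes = 0
--     i = bord_size - 1
--     while(i > 0):
--         max_fitnes += i
--         i -= 1
--     return max_fitnes
--
-- def Fitnes(chromosom):
--     conflicts = 0
--     n = len(chromosom)
--     for i in range(n):
--         for j in range(i+1, n):
--             if i != j:
--                 if chromosom[i] == chromosom[j]:
--                     conflicts += 1
--                 if abs(chromosom[i] - chromosom[j]) == abs(i - j):
--                     conflicts += 1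
--     return Max_Fitnes(n) - conflicts
-- ===== SOURCE B (Python) =====
-- def Fitnes(chromosom):
--     n = len(chromosom)
--     rows = {}
--     diag1 = {}
--     diag2 = {}
--     conflicts = 0
--     for i, v in enumerate(chromosom):
--         conflicts += rows.get(v, 0)
--         rows[v] = rows.get(v, 0) + 1
--         conflicts += diag1.get(i + v, 0)
--         diag1[i + v] = diag1.get(i + v, 0) + 1
--         conflicts += diag2.get(i - v, 0)
--         diag2[i - v] = diag2.get(i - v, 0) + 1
--     return n * (n - 1) // 2 - conflicts
-- ===== Notes on version B (the rewrite author's own statement) =====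
-- stated objective: faster
-- what changed: Replaced the O(n^2) all-pairs conflict scan by a single pass that counts same-row, same-(i+v)-diagonal and same-(i-v)-diagonal collisions with three dicts of counts seen so far, and replaced the Max_Fitnes while-loop by the closed form n*(n-1)//2.
import Mathlib
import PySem

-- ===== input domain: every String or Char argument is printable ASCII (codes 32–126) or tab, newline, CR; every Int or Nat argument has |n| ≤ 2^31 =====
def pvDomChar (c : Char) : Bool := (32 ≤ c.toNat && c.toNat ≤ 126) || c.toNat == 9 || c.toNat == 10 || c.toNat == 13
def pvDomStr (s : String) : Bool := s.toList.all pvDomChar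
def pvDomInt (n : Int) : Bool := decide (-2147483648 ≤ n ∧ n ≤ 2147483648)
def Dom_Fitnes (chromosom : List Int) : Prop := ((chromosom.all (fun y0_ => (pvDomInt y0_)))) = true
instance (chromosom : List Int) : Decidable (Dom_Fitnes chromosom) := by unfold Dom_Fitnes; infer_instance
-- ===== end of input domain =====

-- B replaces A's O(n^2) all-pairs conflict scan by one O(n) pass with three dicts of
-- already-seen counts (row value, i+v diagonal, i-v diagonal) and the closed form n*(n-1)//2.

-- ===== PORT A =====
def Max_Fitnes_go (i acc : Int) : Int :=
  if 0 < i then Max_Fitnes_go (i - 1) (acc + i) else acc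
termination_by i.toNat
decreasing_by omega

def Max_Fitnes (bord_size : Int) : Int := Max_Fitnes_go (bord_size - 1) 0

def Fitnes (chromosom : List Int) : Int :=
  let n : Int := chromosom.length
  let conflicts :=
    (PySem.List.pyRange 0 n 1).foldl (fun c i =>
      (PySem.List.pyRange (i + 1) n 1).foldl (fun c j =>
        if i ≠ j then
          let c := if PySem.List.pyGetD chromosom i 0 = PySem.List.pyGetD chromosom j 0 then c + 1 else c
          if |PySem.List.pyGetD chromosom i 0 - PySem.List.pyGetD chromosom j 0| = |i - j| then c + 1 else c
        else c) c) 0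
  Max_Fitnes n - conflicts

-- ===== PORT B =====
def Fitnes_alt_step (st : PySem.Dict Int Int × PySem.Dict Int Int × PySem.Dict Int Int × Int)
    (p : Int × Int) : PySem.Dict Int Int × PySem.Dict Int Int × PySem.Dict Int Int × Int :=
  let (rows, d1, d2, conflicts) := st
  let i := p.1
  let v := p.2
  let conflicts := conflicts + rows.getD v 0
  let rows := rows.insert v (rows.getD v 0 + 1)
  let conflicts := conflicts + d1.getD (i + v) 0
  let d1 := d1.insert (i + v) (d1.getD (i + v) 0 + 1)
  let conflicts := conflicts + d2.getD (i - v) 0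
  let d2 := d2.insert (i - v) (d2.getD (i - v) 0 + 1)
  (rows, d1, d2, conflicts)

def Fitnes_alt (chromosom : List Int) : Int :=
  let n : Int := chromosom.length
  let st := (PySem.List.enumerate chromosom 0).foldl Fitnes_alt_step
    (PySem.Dict.empty, PySem.Dict.empty, PySem.Dict.empty, 0)
  PySem.Int.floordiv (n * (n - 1)) 2 - st.2.2.2

-- ===== PRECONDITION & SPEC =====
def Spec_Fitnes (chromosom : List Int) (out : Int) : Prop := out = Fitnes_alt chromosom
instance (chromosom : List Int) (out : Int) : Decidable (Spec_Fitnes chromosom out) := by unfold Spec_Fitnes; infer_instance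

-- ===== CLAIM (what is proved, stated in full; the proofs are below) =====
def Claim_equal_Fitnes : Prop := ∀ (chromosom : List Int), Dom_Fitnes chromosom → Spec_Fitnes chromosom (Fitnes chromosom)

-- ===== LEMMAS AND PROOFS =====

-- number of equal (earlier, later) pairs in a list of keys
def pairP : List Int → Int
  | [] => 0
  | y :: ys => (ys.count y : Int) + pairP ys

-- sum of dict-counts over a list of keys
def crossD (d : PySem.Dict Int Int) (ks : List Int) : Int :=
  (ks.map (fun k => d.getD k 0)).sum

def keyA (p : Int × Int) : Int := p.2
def keyB (p : Int × Int) : Int := p.1 + p.2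
def keyC (p : Int × Int) : Int := p.1 - p.2

-- A's inner-loop body on enumerated pairs
def ABody (p : Int × Int) (c : Int) (q : Int × Int) : Int :=
  if p.1 ≠ q.1 then
    let c := if p.2 = q.2 then c + 1 else c
    if |p.2 - q.2| = |p.1 - q.1| then c + 1 else c
  else c

def pairInd (p q : Int × Int) : Int :=
  if p.1 ≠ q.1 then
    (if p.2 = q.2 then 1 else 0) + (if |p.2 - q.2| = |p.1 - q.1| then 1 else 0)
  else 0

def confl : List (Int × Int) → Int
  | [] => 0
  | p :: ps => (ps.map (pairInd p)).sum + confl ps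

theorem maxgo_nat (k : Nat) : ∀ acc : Int, 2 * Max_Fitnes_go (k : Int) acc = 2 * acc + k * (k + 1) := by
  induction k with
  | zero => intro acc; rw [Max_Fitnes_go]; norm_num
  | succ k ih =>
    intro acc
    rw [Max_Fitnes_go]
    have h1 : (0 : Int) < ((k + 1 : Nat) : Int) := by positivity
    rw [if_pos h1]
    have h2 : ((k + 1 : Nat) : Int) - 1 = (k : Int) := by push_cast; ring
    rw [h2, ih]
    push_cast
    ring

theorem maxF_eq (n : Int) (hn : 0 ≤ n) : Max_Fitnes n = PySem.Int.floordiv (n * (n - 1)) 2 := by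
  obtain ⟨m, rfl⟩ := Int.eq_ofNat_of_zero_le hn
  cases m with
  | zero =>
    show Max_Fitnes 0 = _
    unfold Max_Fitnes
    rw [Max_Fitnes_go, PySem.Int.floordiv_eq_ediv_of_pos (by norm_num)]
    norm_num
  | succ k =>
    have h2 : ((k + 1 : Nat) : Int) * (((k + 1 : Nat) : Int) - 1) = 2 * Max_Fitnes_go (k : Int) 0 := by
      rw [maxgo_nat k 0]; push_cast; ring
    have hgo : Max_Fitnes ((k + 1 : Nat) : Int) = Max_Fitnes_go (k : Int) 0 := by
      unfold Max_Fitnes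
      congr 1
      push_cast; ring
    rw [hgo, h2, PySem.Int.floordiv_eq_ediv_of_pos (by norm_num)]
    exact (Int.mul_ediv_cancel_left _ (by norm_num)).symm

theorem crossD_cons (d : PySem.Dict Int Int) (k : Int) (ks : List Int) :
    crossD d (k :: ks) = d.getD k 0 + crossD d ks := by simp [crossD]

theorem crossD_empty (ks : List Int) : crossD PySem.Dict.empty ks = 0 := by
  induction ks with
  | nil => rfl
  | cons k ks ih =>
    rw [crossD_cons, ih]
    simp [PySem.Dict.getD, PySem.Dict.get?, PySem.Dict.empty]

theorem crossD_insert (d : PySem.Dict Int Int) (k : Int) (ks : List Int) :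
    crossD (d.insert k (d.getD k 0 + 1)) ks = crossD d ks + (ks.count k : Int) := by
  induction ks with
  | nil => simp [crossD]
  | cons h ks ih =>
    rw [crossD_cons, crossD_cons, ih, PySem.Dict.getD_insert, List.count_cons]
    by_cases hk : h = k
    · subst hk; simp; ring
    · rw [if_neg hk]
      have : (h == k) = false := by simp [hk]
      rw [this]
      push_cast
      ring

theorem foldB_inv (l : List (Int × Int)) :
    ∀ (r d1 d2 : PySem.Dict Int Int) (a : Int),
      (l.foldl Fitnes_alt_step (r, d1, d2, a)).2.2.2 =
        a + crossD r (l.map keyA) + pairP (l.map keyA)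
          + crossD d1 (l.map keyB) + pairP (l.map keyB)
          + crossD d2 (l.map keyC) + pairP (l.map keyC) := by
  induction l with
  | nil => intro r d1 d2 a; simp [pairP, crossD]
  | cons p l ih =>
    intro r d1 d2 a
    rw [List.foldl_cons]
    show (l.foldl Fitnes_alt_step
      (r.insert p.2 (r.getD p.2 0 + 1), (d1.insert (p.1 + p.2) (d1.getD (p.1 + p.2) 0 + 1)),
        (d2.insert (p.1 - p.2) (d2.getD (p.1 - p.2) 0 + 1)),
        a + r.getD p.2 0 + d1.getD (p.1 + p.2) 0 + d2.getD (p.1 - p.2) 0)).2.2.2 = _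
    rw [ih]
    simp only [List.map_cons, pairP, keyA, keyB, keyC, crossD_cons, crossD_insert]
    ring

theorem fitnesAlt_eq (xs : List Int) :
    Fitnes_alt xs = PySem.Int.floordiv ((xs.length : Int) * ((xs.length : Int) - 1)) 2
      - (pairP ((PySem.List.enumerate xs 0).map keyA)
         + pairP ((PySem.List.enumerate xs 0).map keyB)
         + pairP ((PySem.List.enumerate xs 0).map keyC)) := by
  show PySem.Int.floordiv ((xs.length : Int) * ((xs.length : Int) - 1)) 2
      - ((PySem.List.enumerate xs 0).foldl Fitnes_alt_step
          (PySem.Dict.empty, PySem.Dict.empty, PySem.Dict.empty, 0)).2.2.2 = _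
  rw [foldB_inv]
  simp only [crossD_empty]
  ring

theorem pairInd_split (p q : Int × Int) (h : p.1 < q.1) :
    pairInd p q = (if keyA q = keyA p then 1 else 0) + (if keyB q = keyB p then 1 else 0)
      + (if keyC q = keyC p then 1 else 0) := by
  unfold pairInd keyA keyB keyC
  rw [if_pos (by omega : p.1 ≠ q.1)]
  rcases p with ⟨i, v⟩
  rcases q with ⟨j, w⟩
  simp only at h ⊢
  rw [Int.abs_eq_natAbs, Int.abs_eq_natAbs]
  split_ifs <;> omega

theorem sum_pairInd (p : Int × Int) (ps : List (Int × Int)) (h : ∀ q ∈ ps, p.1 < q.1) :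
    (ps.map (pairInd p)).sum =
      ((ps.map keyA).count (keyA p) : Int) + ((ps.map keyB).count (keyB p) : Int)
        + ((ps.map keyC).count (keyC p) : Int) := by
  induction ps with
  | nil => simp
  | cons q ps ih =>
    have hq : p.1 < q.1 := h q (by simp)
    rw [List.map_cons, List.sum_cons, ih (fun r hr => h r (by simp [hr])),
      pairInd_split p q hq]
    simp only [List.map_cons, List.count_cons]
    push_cast
    split_ifs <;> simp_all <;> ring

theorem confl_eq (l : List (Int × Int)) (h : l.Pairwise (fun p q => p.1 < q.1)) :
    confl l = pairP (l.map keyA) + pairP (l.map keyB) + pairP (l.map keyC) := by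
  induction l with
  | nil => rfl
  | cons p ps ih =>
    rw [List.pairwise_cons] at h
    show (ps.map (pairInd p)).sum + confl ps = _
    rw [ih h.2, sum_pairInd p ps h.1]
    simp only [List.map_cons, pairP]
    ring

theorem foldABody (p : Int × Int) (l : List (Int × Int)) :
    ∀ c : Int, l.foldl (ABody p) c = c + (l.map (pairInd p)).sum := by
  induction l with
  | nil => intro c; simp
  | cons q l ih =>
    intro c
    rw [List.foldl_cons, ih, List.map_cons, List.sum_cons]
    have hb : ABody p c q = c + pairInd p q := by
      unfold ABody pairInd
      split_ifs <;> ring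
    rw [hb]
    ring

theorem enumDrop (xs : List Int) : ∀ (m k : Nat), xs.length - k ≤ m →
    (PySem.List.pyRange (k : Int) (xs.length : Int) 1).map (fun j => (j, PySem.List.pyGetD xs j 0))
      = PySem.List.enumerate (xs.drop k) (k : Int) := by
  intro m
  induction m with
  | zero =>
    intro k hk
    have hle : (xs.length : Int) ≤ (k : Int) := by exact_mod_cast Nat.le_of_sub_eq_zero (Nat.le_zero.mp hk)
    rw [PySem.List.pyRange_one_eq_nil hle, List.drop_of_length_le (by omega),
      PySem.List.enumerate_nil]
    rfl
  | succ m ih =>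
    intro k hk
    by_cases h : k < xs.length
    · rw [PySem.List.pyRange_one_cons (by exact_mod_cast h), List.map_cons,
        List.drop_eq_getElem_cons h, PySem.List.enumerate_cons]
      have hget : PySem.List.pyGetD xs (k : Int) 0 = xs[k] := by
        rw [PySem.List.pyGetD_eq_getElem xs 0 (by positivity) (by exact_mod_cast h)]
        simp
      rw [hget]
      have hcast : ((k : Int) + 1) = ((k + 1 : Nat) : Int) := by push_cast; ring
      rw [hcast, ih (k + 1) (by omega)]
    · have hle : (xs.length : Int) ≤ (k : Int) := by exact_mod_cast Nat.le_of_not_lt h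
      rw [PySem.List.pyRange_one_eq_nil hle, List.drop_of_length_le (by omega),
        PySem.List.enumerate_nil]
      rfl

theorem outerLem (ys : List Int) : ∀ (m k : Nat) (c : Int), ys.length - k ≤ m →
    (PySem.List.enumerate (ys.drop k) (k : Int)).foldl
      (fun c p => (PySem.List.enumerate (ys.drop (p.1 + 1).toNat) (p.1 + 1)).foldl (ABody p) c) c
      = c + confl (PySem.List.enumerate (ys.drop k) (k : Int)) := by
  intro m
  induction m with
  | zero =>
    intro k c hk
    rw [List.drop_of_length_le (by omega), PySem.List.enumerate_nil]
    simp [confl]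
  | succ m ih =>
    intro k c hk
    by_cases h : k < ys.length
    · rw [List.drop_eq_getElem_cons h, PySem.List.enumerate_cons, List.foldl_cons]
      have hto : (((k : Int)) + 1).toNat = k + 1 := by omega
      have hcast : ((k : Int) + 1) = ((k + 1 : Nat) : Int) := by push_cast; ring
      show (PySem.List.enumerate (ys.drop (k + 1)) ((k : Int) + 1)).foldl _
          ((PySem.List.enumerate (ys.drop (((k : Int) + 1).toNat)) ((k : Int) + 1)).foldl
            (ABody ((k : Int), ys[k])) c) = _
      rw [hto, hcast, ih (k + 1) _ (by omega), foldABody]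
      show _ = c + confl (((k : Int), ys[k]) :: PySem.List.enumerate (ys.drop (k + 1)) ((k : Int) + 1))
      rw [hcast]
      show _ = c + ((((PySem.List.enumerate (ys.drop (k + 1)) ((k + 1 : Nat) : Int))).map
        (pairInd ((k : Int), ys[k]))).sum + confl (PySem.List.enumerate (ys.drop (k + 1)) ((k + 1 : Nat) : Int)))
      ring
    · rw [List.drop_of_length_le (by omega), PySem.List.enumerate_nil]
      simp [confl]

theorem fitnes_eq (xs : List Int) :
    Fitnes xs = Max_Fitnes (xs.length : Int) - confl (PySem.List.enumerate xs 0) := by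
  have hstep : ∀ (c i : Int), 0 ≤ i →
      (PySem.List.pyRange (i + 1) (xs.length : Int) 1).foldl (fun c j =>
        if i ≠ j then
          let c := if PySem.List.pyGetD xs i 0 = PySem.List.pyGetD xs j 0 then c + 1 else c
          if |PySem.List.pyGetD xs i 0 - PySem.List.pyGetD xs j 0| = |i - j| then c + 1 else c
        else c) c
      = (PySem.List.enumerate (xs.drop (i + 1).toNat) (i + 1)).foldl
          (ABody (i, PySem.List.pyGetD xs i 0)) c := by
    intro c i hi
    set m := (i + 1).toNat with hmdef
    have hm : (i + 1) = (m : Int) := by omega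
    rw [hm]
    conv_rhs => rw [← enumDrop xs xs.length m (by omega)]
    rw [List.foldl_map]
    rfl
  show Max_Fitnes (xs.length : Int) -
      (PySem.List.pyRange 0 (xs.length : Int) 1).foldl (fun c i =>
        (PySem.List.pyRange (i + 1) (xs.length : Int) 1).foldl (fun c j =>
          if i ≠ j then
            let c := if PySem.List.pyGetD xs i 0 = PySem.List.pyGetD xs j 0 then c + 1 else c
            if |PySem.List.pyGetD xs i 0 - PySem.List.pyGetD xs j 0| = |i - j| then c + 1 else c
          else c) c) 0 = _
  congr 1
  have hmem : ∀ (acc : Int), ∀ x ∈ PySem.List.pyRange 0 (xs.length : Int) 1,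
      (fun c i => (PySem.List.pyRange (i + 1) (xs.length : Int) 1).foldl (fun c j =>
        if i ≠ j then
          let c := if PySem.List.pyGetD xs i 0 = PySem.List.pyGetD xs j 0 then c + 1 else c
          if |PySem.List.pyGetD xs i 0 - PySem.List.pyGetD xs j 0| = |i - j| then c + 1 else c
        else c) c) acc x
      = (fun c i => (PySem.List.enumerate (xs.drop (i + 1).toNat) (i + 1)).foldl
          (ABody (i, PySem.List.pyGetD xs i 0)) c) acc x := by
    intro acc x hx
    have hx0 : 0 ≤ x := ((PySem.List.mem_pyRange_one).mp hx).1
    exact hstep acc x hx0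
  rw [PySem.List.foldl_congr_mem _ _ _ 0 hmem]
  have h0 := enumDrop xs xs.length 0 (by omega)
  rw [Nat.cast_zero, List.drop_zero] at h0
  have hout := outerLem xs xs.length 0 0 (by omega)
  rw [Nat.cast_zero, List.drop_zero] at hout
  rw [zero_add] at hout
  conv at hout => lhs; rw [← h0, List.foldl_map]
  exact hout

-- ===== VERDICT (by name: the statement is the Claim_ definition above) =====
theorem Fitnes_spec : Claim_equal_Fitnes := by
  intro xs _
  unfold Spec_Fitnes
  rw [fitnes_eq, fitnesAlt_eq, maxF_eq _ (by positivity),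
    confl_eq _ (PySem.List.pairwise_lt_enumerate xs 0)]
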